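-- pv_equiv track=rewrite | github.com/723poil/coding-test-study | week1/09.상어 초등학교/상어_초등학교_이상협.py | find_empty_seat
-- ===== SOURCE A (Python) =====
-- def find_empty_seat(seats: list):
--
--     n = len(seats)
--     max_able = 0
--
--     for row in seats[1:]:
--         for col in row[1:]:
--             max_able = max(max_able, col[1])
--
--     for row in range(1, n):
--         for col in range(1, n):
--             if seats[row][col][1] == max_able and seats[row][col][0] == 0:
--                 return [(row, col)]
-- ===== SOURCE B (Python) =====
-- def find_empty_seat(seats: list):
--     n = len(seats)
--     max_able = 0
--     first = {}
--     for r in range(1, n):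
--         for c in range(1, n):
--             free, pref = seats[r][c][0], seats[r][c][1]
--             if pref > max_able:
--                 max_able = pref
--             if free == 0:
--                 first.setdefault(pref, (r, c))
--     if max_able in first:
--         return [first[max_able]]
-- ===== Notes on version B (the rewrite author's own statement) =====
-- stated objective: alternative
-- what changed: One pass over the seat grid that tracks the maximum preference while indexing, via setdefault, the first empty seat per preference value, answered by a single dict lookup; Pre_ restricts to the problem's natural domain of square grids (each row after the first has exactly n cells of width >= 2), because on ragged grids A's max pass reads columns its selection pass never visits (and A raises IndexError on short rows/cells).
-- outside the precondition, e.g. on find_empty_seat([[], [[0, 0], [0, 5], [0, 9]]]): A returns None, B returns [(1, 1)]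
import Mathlib
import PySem

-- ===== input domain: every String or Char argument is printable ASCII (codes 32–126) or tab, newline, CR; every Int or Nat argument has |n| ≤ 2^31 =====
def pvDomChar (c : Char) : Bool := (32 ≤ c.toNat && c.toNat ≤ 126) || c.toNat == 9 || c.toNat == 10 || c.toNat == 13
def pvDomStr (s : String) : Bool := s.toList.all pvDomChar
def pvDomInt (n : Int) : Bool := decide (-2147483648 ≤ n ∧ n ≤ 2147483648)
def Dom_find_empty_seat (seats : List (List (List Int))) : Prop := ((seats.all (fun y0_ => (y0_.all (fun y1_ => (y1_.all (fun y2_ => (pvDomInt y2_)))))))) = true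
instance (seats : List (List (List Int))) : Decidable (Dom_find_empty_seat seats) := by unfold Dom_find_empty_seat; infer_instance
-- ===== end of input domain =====

-- B replaces A's two nested scans by one pass over the seat grid that tracks the maximum
-- preference while indexing (setdefault) the first empty seat per preference value, then
-- answers with one dict lookup; objective: alternative (same cost, different structure).

-- ===== PORT A =====
def find_empty_seat (seats : List (List (List Int))) : Option (List (Int × Int)) :=
  let n : Int := seats.length
  let max_able : Int :=
    (PySem.List.slice seats (some 1) none).foldl
      (fun m row => (PySem.List.slice row (some 1) none).foldl
        (fun m col => max m (PySem.List.pyGetD col 1 0)) m) 0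
  (PySem.List.pyRange 1 n 1).findSome? (fun r =>
    (PySem.List.pyRange 1 n 1).findSome? (fun c =>
      if PySem.List.pyGetD (PySem.List.pyGetD (PySem.List.pyGetD seats r []) c []) 1 0 = max_able
          ∧ PySem.List.pyGetD (PySem.List.pyGetD (PySem.List.pyGetD seats r []) c []) 0 0 = 0
      then some [(r, c)] else none))

-- ===== PORT B =====
def find_empty_seat_alt (seats : List (List (List Int))) : Option (List (Int × Int)) :=
  let n : Int := seats.length
  let st :=
    (PySem.List.pyRange 1 n 1).foldl
      (fun (st : Int × PySem.Dict Int (Int × Int)) r =>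
        (PySem.List.pyRange 1 n 1).foldl
          (fun st c =>
            let free := PySem.List.pyGetD (PySem.List.pyGetD (PySem.List.pyGetD seats r []) c []) 0 0
            let pref := PySem.List.pyGetD (PySem.List.pyGetD (PySem.List.pyGetD seats r []) c []) 1 0
            let m := if pref > st.1 then pref else st.1
            let d := if free = 0 ∧ st.2.get? pref = none
                     then st.2.insert pref (r, c) else st.2
            (m, d)) st)
      ((0 : Int), (PySem.Dict.empty : PySem.Dict Int (Int × Int)))
  (st.2.get? st.1).map (fun pos => [pos])

-- ===== PRECONDITION & SPEC =====
-- Pre_ restricts to the problem's natural domain, square grids: each row after the first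
-- has exactly len(seats) cells, each of width ≥ 2.  Outside it A raises IndexError (short
-- rows or cells), or — on rows longer than n — A's max pass reads columns its selection
-- pass never visits, an accident of the mismatched loop bounds.
def Pre_find_empty_seat (seats : List (List (List Int))) : Prop :=
  ∀ row ∈ seats.drop 1, row.length = seats.length ∧ ∀ cell ∈ row.drop 1, 2 ≤ cell.length
instance (seats : List (List (List Int))) : Decidable (Pre_find_empty_seat seats) := by
  unfold Pre_find_empty_seat; infer_instance
def pvWitness_find_empty_seat : List (List (List Int)) :=
  [[[0, 0], [0, 0]], [[0, 0], [0, 3]]]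

def Spec_find_empty_seat (seats : List (List (List Int))) (out : Option (List (Int × Int))) : Prop := out = find_empty_seat_alt seats
instance (seats : List (List (List Int))) (out : Option (List (Int × Int))) : Decidable (Spec_find_empty_seat seats out) := by unfold Spec_find_empty_seat; infer_instance

-- ===== CLAIM (what is proved, stated in full; the proofs are below) =====
def Claim_equal_find_empty_seat : Prop := ∀ (seats : List (List (List Int))), Dom_find_empty_seat seats → Pre_find_empty_seat seats → Spec_find_empty_seat seats (find_empty_seat seats)

-- ===== LEMMAS AND PROOFS =====

-- the row-major stream of (row index, col index, cell) over rows 1.. and cols 1..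
def pvCands (seats : List (List (List Int))) : List (Int × Int × List Int) :=
  (PySem.List.enumerate (seats.drop 1) 1).flatMap (fun rp =>
    (PySem.List.enumerate (rp.2.drop 1) 1).map (fun cp => (rp.1, cp.1, cp.2)))

def pvC1 (t : Int × Int × List Int) : Int := PySem.List.pyGetD t.2.2 1 0
def pvC0 (t : Int × Int × List Int) : Int := PySem.List.pyGetD t.2.2 0 0

-- an index loop 'for i in range(s, m)' over xs[i], m ≤ len xs, as a loop over enumerate((xs[:m])[s:], s)
theorem pv_foldl_idx {α β : Type} (ys : List α) (d : α) (f : β → Int → α → β) :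
    ∀ (k s : Nat) (init : β), s + k ≤ ys.length →
      (PySem.List.pyRange (s : Int) ((s + k : Nat) : Int) 1).foldl
          (fun acc i => f acc i (PySem.List.pyGetD ys i d)) init
        = (PySem.List.enumerate ((ys.take (s + k)).drop s) (s : Int)).foldl
          (fun acc p => f acc p.1 p.2) init := by
  intro k
  induction k with
  | zero =>
    intro s init h
    rw [PySem.List.pyRange_one_eq_nil (by push_cast; omega)]
    rw [List.drop_eq_nil_of_le (by simp)]
    rfl
  | succ k ih =>
    intro s init h
    have hs : s < ys.length := by omega
    rw [PySem.List.pyRange_one_cons (by push_cast; omega)]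
    have hdrop : (ys.take (s + (k + 1))).drop s
        = ys[s] :: (ys.take ((s + 1) + k)).drop (s + 1) := by
      rw [show s + (k + 1) = (s + 1) + k by omega,
        List.drop_eq_getElem_cons (by simp; omega)]
      congr 1
      exact List.getElem_take
    rw [hdrop, PySem.List.enumerate_cons]
    simp only [List.foldl_cons]
    have hget : PySem.List.pyGetD ys (s : Int) d = ys[s] := by
      rw [PySem.List.pyGetD_natCast]; exact List.getD_eq_getElem ys d hs
    rw [hget]
    have hrec := ih (s + 1) (f init (s : Int) ys[s]) (by omega)
    rw [show ((s : Int) + 1) = ((s + 1 : Nat) : Int) by push_cast; ring,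
      show ((s + (k + 1) : Nat) : Int) = (((s + 1) + k : Nat) : Int) by push_cast; ring]
    exact hrec

theorem pv_findSome?_idx {α β : Type} (ys : List α) (d : α) (f : Int → α → Option β) :
    ∀ (k s : Nat), s + k ≤ ys.length →
      (PySem.List.pyRange (s : Int) ((s + k : Nat) : Int) 1).findSome?
          (fun i => f i (PySem.List.pyGetD ys i d))
        = (PySem.List.enumerate ((ys.take (s + k)).drop s) (s : Int)).findSome?
          (fun p => f p.1 p.2) := by
  intro k
  induction k with
  | zero =>
    intro s h
    rw [PySem.List.pyRange_one_eq_nil (by push_cast; omega)]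
    rw [List.drop_eq_nil_of_le (by simp)]
    rfl
  | succ k ih =>
    intro s h
    have hs : s < ys.length := by omega
    rw [PySem.List.pyRange_one_cons (by push_cast; omega)]
    have hdrop : (ys.take (s + (k + 1))).drop s
        = ys[s] :: (ys.take ((s + 1) + k)).drop (s + 1) := by
      rw [show s + (k + 1) = (s + 1) + k by omega,
        List.drop_eq_getElem_cons (by simp; omega)]
      congr 1
      exact List.getElem_take
    rw [hdrop, PySem.List.enumerate_cons]
    simp only [List.findSome?_cons]
    have hget : PySem.List.pyGetD ys (s : Int) d = ys[s] := by
      rw [PySem.List.pyGetD_natCast]; exact List.getD_eq_getElem ys d hs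
    rw [hget]
    cases f (s : Int) ys[s] with
    | some b => rfl
    | none =>
      have hrec := ih (s + 1) (by omega)
      rw [show ((s : Int) + 1) = ((s + 1 : Nat) : Int) by push_cast; ring,
        show ((s + (k + 1) : Nat) : Int) = (((s + 1) + k : Nat) : Int) by push_cast; ring]
      exact hrec

theorem pv_findSome?_flatMap {α β γ : Type} (l : List α) (g : α → List β) (f : β → Option γ) :
    (l.flatMap g).findSome? f = l.findSome? (fun x => (g x).findSome? f) := by
  induction l with
  | nil => rfl
  | cons x xs ih =>
    rw [List.flatMap_cons, List.findSome?_append, List.findSome?_cons]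
    cases h : (g x).findSome? f with
    | some b => simp [Option.or]
    | none => simpa [Option.or] using ih

theorem pv_findSome?_map {α β γ : Type} (l : List α) (g : α → β) (f : β → Option γ) :
    (l.map g).findSome? f = l.findSome? (fun x => f (g x)) := by
  induction l with
  | nil => rfl
  | cons x xs ih => rw [List.map_cons, List.findSome?_cons, List.findSome?_cons]; cases f (g x) <;> simp [ih]

theorem pv_findSome?_congr {α β : Type} (l : List α) (f g : α → Option β)
    (h : ∀ x ∈ l, f x = g x) : l.findSome? f = l.findSome? g := by
  induction l with
  | nil => rfl
  | cons x xs ih =>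
    rw [List.findSome?_cons, List.findSome?_cons, h x (by simp)]
    cases g x <;> simp [ih fun y hy => h y (by simp [hy])]

-- get? after a setdefault-style fold: the first matching element wins
theorem pv_get?_dfold (G : Int × Int × List Int → Prop) [DecidablePred G]
    (l : List (Int × Int × List Int)) :
    ∀ (d : PySem.Dict Int (Int × Int)) (k : Int),
      ((l.foldl (fun d t => if G t ∧ d.get? (pvC1 t) = none
                            then d.insert (pvC1 t) (t.1, t.2.1) else d) d).get? k)
        = ((d.get? k).or ((l.find? (fun t => decide (G t) && decide (pvC1 t = k))).map
            (fun t => (t.1, t.2.1)))) := by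
  induction l with
  | nil => intro d k; simp
  | cons t ts ih =>
    intro d k
    rw [List.foldl_cons]
    by_cases hg : G t ∧ d.get? (pvC1 t) = none
    · rw [if_pos hg, ih]
      by_cases hk : pvC1 t = k
      · subst hk
        rw [PySem.Dict.get?_insert_self,
          List.find?_cons_of_pos (by simp [hg.1]), hg.2]
        rfl
      · rw [PySem.Dict.get?_insert_of_ne _ _ (fun h => hk h.symm),
          List.find?_cons_of_neg (by simp [hk])]
    · rw [if_neg hg, ih]
      by_cases hb : (decide (G t) && decide (pvC1 t = k)) = true
      · rw [List.find?_cons_of_pos (p := fun t => decide (G t) && decide (pvC1 t = k)) hb]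
        simp only [Bool.and_eq_true, decide_eq_true_eq] at hb
        obtain ⟨v, hv⟩ : ∃ v, d.get? k = some v := by
          cases hdk : d.get? k with
          | none => exact absurd ⟨hb.1, by rw [hb.2]; exact hdk⟩ hg
          | some v => exact ⟨v, rfl⟩
        simp [hv, Option.or]
      · rw [List.find?_cons_of_neg (p := fun t => decide (G t) && decide (pvC1 t = k)) hb]

theorem pv_find?_map_findSome? {α β : Type} (l : List α) (p : α → Bool) (g : α → β) :
    (l.find? p).map g = l.findSome? (fun x => if p x then some (g x) else none) := by
  induction l with
  | nil => rfl
  | cons x xs ih =>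
    rw [List.find?_cons, List.findSome?_cons]
    by_cases h : p x <;> simp [h, ih]

theorem pv_foldl_enum_snd {α β : Type} (xs : List α) (s : Int) (g : β → α → β) (init : β) :
    (PySem.List.enumerate xs s).foldl (fun a p => g a p.2) init = xs.foldl g init := by
  conv_rhs => rw [← PySem.List.map_snd_enumerate xs s]
  rw [List.foldl_map]

theorem pv_foldl_idx' {α β : Type} (ys : List α) (d : α) (f : β → Int → α → β)
    (s m : Nat) (init : β) (hm : m ≤ ys.length) (hs : s ≤ m) :
    (PySem.List.pyRange (s : Int) (m : Int) 1).foldl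
        (fun acc i => f acc i (PySem.List.pyGetD ys i d)) init
      = (PySem.List.enumerate ((ys.take m).drop s) (s : Int)).foldl
        (fun acc p => f acc p.1 p.2) init := by
  have h := pv_foldl_idx ys d f (m - s) s init (by omega)
  rw [show s + (m - s) = m by omega] at h
  exact h

theorem pv_findSome?_idx' {α β : Type} (ys : List α) (d : α) (f : Int → α → Option β)
    (s m : Nat) (hm : m ≤ ys.length) (hs : s ≤ m) :
    (PySem.List.pyRange (s : Int) (m : Int) 1).findSome?
        (fun i => f i (PySem.List.pyGetD ys i d))
      = (PySem.List.enumerate ((ys.take m).drop s) (s : Int)).findSome?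
        (fun p => f p.1 p.2) := by
  have h := pv_findSome?_idx ys d f (m - s) s (by omega)
  rw [show s + (m - s) = m by omega] at h
  exact h

def pvM (seats : List (List (List Int))) : Int :=
  (pvCands seats).foldl (fun m t => max m (pvC1 t)) 0

def pvD (seats : List (List (List Int))) : PySem.Dict Int (Int × Int) :=
  (pvCands seats).foldl
    (fun d t => if pvC0 t = 0 ∧ d.get? (pvC1 t) = none
                then d.insert (pvC1 t) (t.1, t.2.1) else d)
    PySem.Dict.empty

theorem pv_M_eq (seats : List (List (List Int))) :
    pvM seats
      = (seats.drop 1).foldl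
          (fun m row => (row.drop 1).foldl
            (fun m col => max m (PySem.List.pyGetD col 1 0)) m) 0 := by
  unfold pvM pvCands
  rw [List.foldl_flatMap]
  calc (PySem.List.enumerate (seats.drop 1) 1).foldl
        (fun acc rp => ((PySem.List.enumerate (rp.2.drop 1) 1).map
          (fun cp => (rp.1, cp.1, cp.2))).foldl (fun m t => max m (pvC1 t)) acc) 0
      = (PySem.List.enumerate (seats.drop 1) 1).foldl
        (fun acc rp => (rp.2.drop 1).foldl
          (fun m cell => max m (PySem.List.pyGetD cell 1 0)) acc) 0 := by
        apply PySem.List.foldl_congr_mem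
        intro acc rp _
        rw [List.foldl_map]
        exact pv_foldl_enum_snd (rp.2.drop 1) 1
          (fun m cell => max m (PySem.List.pyGetD cell 1 0)) acc
    _ = _ := pv_foldl_enum_snd (seats.drop 1) 1
          (fun m row => (row.drop 1).foldl
            (fun m col => max m (PySem.List.pyGetD col 1 0)) m) 0

theorem pv_maxA (seats : List (List (List Int))) :
    (PySem.List.slice seats (some 1) none).foldl
        (fun m row => (PySem.List.slice row (some 1) none).foldl
          (fun m col => max m (PySem.List.pyGetD col 1 0)) m) 0
      = pvM seats := by
  rw [pv_M_eq]
  simp only [PySem.List.slice_from_one, ← List.drop_one]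

theorem pv_Bfold (seats : List (List (List Int))) (hpre : Pre_find_empty_seat seats)
    (hne : seats ≠ []) :
    (PySem.List.pyRange 1 (seats.length : Int) 1).foldl
        (fun (st : Int × PySem.Dict Int (Int × Int)) r =>
          (PySem.List.pyRange 1 (seats.length : Int) 1).foldl
            (fun st c =>
              ((if PySem.List.pyGetD (PySem.List.pyGetD (PySem.List.pyGetD seats r []) c []) 1 0 > st.1
                  then PySem.List.pyGetD (PySem.List.pyGetD (PySem.List.pyGetD seats r []) c []) 1 0
                  else st.1),
               (if PySem.List.pyGetD (PySem.List.pyGetD (PySem.List.pyGetD seats r []) c []) 0 0 = 0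
                    ∧ st.2.get? (PySem.List.pyGetD (PySem.List.pyGetD (PySem.List.pyGetD seats r []) c []) 1 0) = none
                  then st.2.insert (PySem.List.pyGetD (PySem.List.pyGetD (PySem.List.pyGetD seats r []) c []) 1 0) (r, c)
                  else st.2)))
            st)
        ((0 : Int), (PySem.Dict.empty : PySem.Dict Int (Int × Int)))
      = (pvM seats, pvD seats) := by
  have hn : 1 ≤ seats.length := by
    cases seats with | nil => exact absurd rfl hne | cons a l => simp
  calc (PySem.List.pyRange ((1 : Nat) : Int) ((seats.length : Nat) : Int) 1).foldl
        (fun (st : Int × PySem.Dict Int (Int × Int)) r =>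
          (PySem.List.pyRange 1 (seats.length : Int) 1).foldl
            (fun st c =>
              ((if PySem.List.pyGetD (PySem.List.pyGetD (PySem.List.pyGetD seats r []) c []) 1 0 > st.1
                  then PySem.List.pyGetD (PySem.List.pyGetD (PySem.List.pyGetD seats r []) c []) 1 0
                  else st.1),
               (if PySem.List.pyGetD (PySem.List.pyGetD (PySem.List.pyGetD seats r []) c []) 0 0 = 0
                    ∧ st.2.get? (PySem.List.pyGetD (PySem.List.pyGetD (PySem.List.pyGetD seats r []) c []) 1 0) = none
                  then st.2.insert (PySem.List.pyGetD (PySem.List.pyGetD (PySem.List.pyGetD seats r []) c []) 1 0) (r, c)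
                  else st.2)))
            st)
        ((0 : Int), (PySem.Dict.empty : PySem.Dict Int (Int × Int)))
      = (PySem.List.enumerate ((seats.take seats.length).drop 1) ((1 : Nat) : Int)).foldl
        (fun (st : Int × PySem.Dict Int (Int × Int)) rp =>
          (PySem.List.pyRange 1 (seats.length : Int) 1).foldl
            (fun st c =>
              ((if PySem.List.pyGetD (PySem.List.pyGetD rp.2 c []) 1 0 > st.1
                  then PySem.List.pyGetD (PySem.List.pyGetD rp.2 c []) 1 0
                  else st.1),
               (if PySem.List.pyGetD (PySem.List.pyGetD rp.2 c []) 0 0 = 0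
                    ∧ st.2.get? (PySem.List.pyGetD (PySem.List.pyGetD rp.2 c []) 1 0) = none
                  then st.2.insert (PySem.List.pyGetD (PySem.List.pyGetD rp.2 c []) 1 0) (rp.1, c)
                  else st.2)))
            st)
        ((0 : Int), (PySem.Dict.empty : PySem.Dict Int (Int × Int)))
        := pv_foldl_idx' seats []
            (fun (st : Int × PySem.Dict Int (Int × Int)) (r : Int) (row : List (List Int)) =>
              (PySem.List.pyRange 1 (seats.length : Int) 1).foldl
                (fun st c =>
                  ((if PySem.List.pyGetD (PySem.List.pyGetD row c []) 1 0 > st.1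
                      then PySem.List.pyGetD (PySem.List.pyGetD row c []) 1 0
                      else st.1),
                   (if PySem.List.pyGetD (PySem.List.pyGetD row c []) 0 0 = 0
                        ∧ st.2.get? (PySem.List.pyGetD (PySem.List.pyGetD row c []) 1 0) = none
                      then st.2.insert (PySem.List.pyGetD (PySem.List.pyGetD row c []) 1 0) (r, c)
                      else st.2)))
                st)
            1 seats.length _ (le_refl _) hn
    _ = (PySem.List.enumerate (seats.drop 1) 1).foldl
        (fun (st : Int × PySem.Dict Int (Int × Int)) rp =>
          (PySem.List.enumerate (rp.2.drop 1) 1).foldl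
            (fun st cp =>
              ((if PySem.List.pyGetD cp.2 1 0 > st.1 then PySem.List.pyGetD cp.2 1 0 else st.1),
               (if PySem.List.pyGetD cp.2 0 0 = 0
                    ∧ st.2.get? (PySem.List.pyGetD cp.2 1 0) = none
                  then st.2.insert (PySem.List.pyGetD cp.2 1 0) (rp.1, cp.1)
                  else st.2)))
            st)
        ((0 : Int), (PySem.Dict.empty : PySem.Dict Int (Int × Int))) := by
        rw [List.take_length]
        apply PySem.List.foldl_congr_mem
        intro st rp hrp
        have hmem : rp.2 ∈ seats.drop 1 := by
          rw [PySem.List.mem_enumerate_iff] at hrp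
          obtain ⟨k, hk, hp⟩ := hrp
          rw [hp]
          exact List.getElem_mem _
        have hlen : rp.2.length = seats.length := (hpre rp.2 hmem).1
        have h2 := pv_foldl_idx' rp.2 []
            (fun (st : Int × PySem.Dict Int (Int × Int)) (c : Int) (cell : List Int) =>
              ((if PySem.List.pyGetD cell 1 0 > st.1 then PySem.List.pyGetD cell 1 0 else st.1),
               (if PySem.List.pyGetD cell 0 0 = 0
                    ∧ st.2.get? (PySem.List.pyGetD cell 1 0) = none
                  then st.2.insert (PySem.List.pyGetD cell 1 0) (rp.1, c)
                  else st.2)))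
            1 seats.length st (by omega) (by omega)
        rw [← hlen, List.take_length] at h2
        rw [hlen] at h2
        exact h2
    _ = (pvCands seats).foldl
        (fun (st : Int × PySem.Dict Int (Int × Int)) t =>
          ((if pvC1 t > st.1 then pvC1 t else st.1),
           (if pvC0 t = 0 ∧ st.2.get? (pvC1 t) = none
              then st.2.insert (pvC1 t) (t.1, t.2.1) else st.2)))
        ((0 : Int), (PySem.Dict.empty : PySem.Dict Int (Int × Int))) := by
        unfold pvCands
        rw [List.foldl_flatMap]
        simp only [List.foldl_map]
        rfl
    _ = ((pvCands seats).foldl (fun m t => if pvC1 t > m then pvC1 t else m) 0, pvD seats)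
        := PySem.List.foldl_prod_mk
            (fun m t => if pvC1 t > m then pvC1 t else m)
            (fun d t => if pvC0 t = 0 ∧ d.get? (pvC1 t) = none
                        then d.insert (pvC1 t) (t.1, t.2.1) else d)
            (pvCands seats) 0 PySem.Dict.empty
    _ = (pvM seats, pvD seats) := by
        have : (pvCands seats).foldl (fun m t => if pvC1 t > m then pvC1 t else m) 0 = pvM seats := by
          unfold pvM
          apply PySem.List.foldl_congr_mem
          intro acc t _
          by_cases h : pvC1 t ≤ acc
          · rw [if_neg (not_lt.2 h)]
            exact (max_eq_left h).symm
          · rw [if_pos (not_le.1 h)]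
            exact (max_eq_right (not_le.1 h).le).symm
        rw [this]

theorem pv_B_eq (seats : List (List (List Int))) (hpre : Pre_find_empty_seat seats)
    (hne : seats ≠ []) :
    find_empty_seat_alt seats = ((pvD seats).get? (pvM seats)).map (fun pos => [pos]) := by
  have h := pv_Bfold seats hpre hne
  calc find_empty_seat_alt seats
      = (((PySem.List.pyRange 1 (seats.length : Int) 1).foldl
            (fun (st : Int × PySem.Dict Int (Int × Int)) r =>
              (PySem.List.pyRange 1 (seats.length : Int) 1).foldl
                (fun st c =>
                  ((if PySem.List.pyGetD (PySem.List.pyGetD (PySem.List.pyGetD seats r []) c []) 1 0 > st.1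
                      then PySem.List.pyGetD (PySem.List.pyGetD (PySem.List.pyGetD seats r []) c []) 1 0
                      else st.1),
                   (if PySem.List.pyGetD (PySem.List.pyGetD (PySem.List.pyGetD seats r []) c []) 0 0 = 0
                        ∧ st.2.get? (PySem.List.pyGetD (PySem.List.pyGetD (PySem.List.pyGetD seats r []) c []) 1 0) = none
                      then st.2.insert (PySem.List.pyGetD (PySem.List.pyGetD (PySem.List.pyGetD seats r []) c []) 1 0) (r, c)
                      else st.2)))
                st)
            ((0 : Int), (PySem.Dict.empty : PySem.Dict Int (Int × Int)))).2.get?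
          ((PySem.List.pyRange 1 (seats.length : Int) 1).foldl
            (fun (st : Int × PySem.Dict Int (Int × Int)) r =>
              (PySem.List.pyRange 1 (seats.length : Int) 1).foldl
                (fun st c =>
                  ((if PySem.List.pyGetD (PySem.List.pyGetD (PySem.List.pyGetD seats r []) c []) 1 0 > st.1
                      then PySem.List.pyGetD (PySem.List.pyGetD (PySem.List.pyGetD seats r []) c []) 1 0
                      else st.1),
                   (if PySem.List.pyGetD (PySem.List.pyGetD (PySem.List.pyGetD seats r []) c []) 0 0 = 0
                        ∧ st.2.get? (PySem.List.pyGetD (PySem.List.pyGetD (PySem.List.pyGetD seats r []) c []) 1 0) = none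
                      then st.2.insert (PySem.List.pyGetD (PySem.List.pyGetD (PySem.List.pyGetD seats r []) c []) 1 0) (r, c)
                      else st.2)))
                st)
            ((0 : Int), (PySem.Dict.empty : PySem.Dict Int (Int × Int)))).1).map
          (fun pos => [pos]) := rfl
    _ = ((pvD seats).get? (pvM seats)).map (fun pos => [pos]) := by rw [h]

theorem pv_A_eq (seats : List (List (List Int))) (hpre : Pre_find_empty_seat seats)
    (hne : seats ≠ []) :
    find_empty_seat seats
      = (pvCands seats).findSome?
          (fun t => if pvC1 t = pvM seats ∧ pvC0 t = 0 then some [(t.1, t.2.1)] else none) := by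
  have hn : 1 ≤ seats.length := by
    cases seats with | nil => exact absurd rfl hne | cons a l => simp
  rw [show find_empty_seat seats
      = (PySem.List.pyRange 1 (seats.length : Int) 1).findSome? (fun r =>
          (PySem.List.pyRange 1 (seats.length : Int) 1).findSome? (fun c =>
            if PySem.List.pyGetD (PySem.List.pyGetD (PySem.List.pyGetD seats r []) c []) 1 0
                = (PySem.List.slice seats (some 1) none).foldl
                    (fun m row => (PySem.List.slice row (some 1) none).foldl
                      (fun m col => max m (PySem.List.pyGetD col 1 0)) m) 0
                ∧ PySem.List.pyGetD (PySem.List.pyGetD (PySem.List.pyGetD seats r []) c []) 0 0 = 0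
            then some [(r, c)] else none)) from rfl, pv_maxA]
  calc (PySem.List.pyRange 1 (seats.length : Int) 1).findSome? (fun r =>
          (PySem.List.pyRange 1 (seats.length : Int) 1).findSome? (fun c =>
            if PySem.List.pyGetD (PySem.List.pyGetD (PySem.List.pyGetD seats r []) c []) 1 0 = pvM seats
                ∧ PySem.List.pyGetD (PySem.List.pyGetD (PySem.List.pyGetD seats r []) c []) 0 0 = 0
            then some [(r, c)] else none))
      = (PySem.List.enumerate ((seats.take seats.length).drop 1) ((1 : Nat) : Int)).findSome?
          (fun rp => (PySem.List.pyRange 1 (seats.length : Int) 1).findSome? (fun c =>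
            if PySem.List.pyGetD (PySem.List.pyGetD rp.2 c []) 1 0 = pvM seats
                ∧ PySem.List.pyGetD (PySem.List.pyGetD rp.2 c []) 0 0 = 0
            then some [(rp.1, c)] else none))
        := pv_findSome?_idx' seats []
            (fun (r : Int) (row : List (List Int)) =>
              (PySem.List.pyRange 1 (seats.length : Int) 1).findSome? (fun c =>
                if PySem.List.pyGetD (PySem.List.pyGetD row c []) 1 0 = pvM seats
                    ∧ PySem.List.pyGetD (PySem.List.pyGetD row c []) 0 0 = 0
                then some [(r, c)] else none))
            1 seats.length (le_refl _) hn
    _ = (PySem.List.enumerate (seats.drop 1) 1).findSome?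
          (fun rp => (PySem.List.enumerate (rp.2.drop 1) 1).findSome? (fun cp =>
            if PySem.List.pyGetD cp.2 1 0 = pvM seats ∧ PySem.List.pyGetD cp.2 0 0 = 0
              then some [(rp.1, cp.1)] else none)) := by
        rw [List.take_length]
        apply pv_findSome?_congr
        intro rp hrp
        have hmem : rp.2 ∈ seats.drop 1 := by
          rw [PySem.List.mem_enumerate_iff] at hrp
          obtain ⟨k, hk, hp⟩ := hrp
          rw [hp]
          exact List.getElem_mem _
        have hlen : rp.2.length = seats.length := (hpre rp.2 hmem).1
        have h2 := pv_findSome?_idx' rp.2 []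
            (fun (c : Int) (cell : List Int) =>
              if PySem.List.pyGetD cell 1 0 = pvM seats ∧ PySem.List.pyGetD cell 0 0 = 0
              then some [(rp.1, c)] else none)
            1 seats.length (by omega) (by omega)
        rw [← hlen, List.take_length] at h2
        rw [hlen] at h2
        exact h2
    _ = (pvCands seats).findSome?
          (fun t => if pvC1 t = pvM seats ∧ pvC0 t = 0 then some [(t.1, t.2.1)] else none) := by
        unfold pvCands
        rw [pv_findSome?_flatMap]
        simp only [pv_findSome?_map]
        rfl

-- ===== VERDICT (by name: the statement is the Claim_ definition above) =====
theorem find_empty_seat_spec : Claim_equal_find_empty_seat := by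
  unfold Claim_equal_find_empty_seat
  intro seats _ hpre
  unfold Spec_find_empty_seat
  by_cases hne : seats = []
  · subst hne; rfl
  · rw [pv_A_eq seats hpre hne, pv_B_eq seats hpre hne]
    have hd : (pvD seats).get? (pvM seats)
        = ((pvCands seats).find?
            (fun t => decide (pvC0 t = 0) && decide (pvC1 t = pvM seats))).map
            (fun t => (t.1, t.2.1)) := by
      have h := pv_get?_dfold (fun t => pvC0 t = 0)
        (pvCands seats) PySem.Dict.empty (pvM seats)
      rw [PySem.Dict.get?_empty] at h
      exact h
    calc (pvCands seats).findSome?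
          (fun t => if pvC1 t = pvM seats ∧ pvC0 t = 0 then some [(t.1, t.2.1)] else none)
        = (pvCands seats).findSome?
          (fun t => if (decide (pvC0 t = 0) && decide (pvC1 t = pvM seats))
            then some [(t.1, t.2.1)] else none) := by
          apply pv_findSome?_congr
          intro t _
          by_cases h2 : pvC0 t = 0 <;> by_cases h3 : pvC1 t = pvM seats <;> simp [h2, h3]
      _ = ((pvCands seats).find?
            (fun t => decide (pvC0 t = 0) && decide (pvC1 t = pvM seats))).map
            (fun t => [(t.1, t.2.1)])
          := (pv_find?_map_findSome? _ _ _).symm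
      _ = (((pvCands seats).find?
            (fun t => decide (pvC0 t = 0) && decide (pvC1 t = pvM seats))).map
            (fun t => (t.1, t.2.1))).map (fun pos => [pos]) := by
          cases h : (pvCands seats).find?
            (fun t => decide (pvC0 t = 0) && decide (pvC1 t = pvM seats)) <;> simp
      _ = ((pvD seats).get? (pvM seats)).map (fun pos => [pos]) := by rw [hd]
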